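-- pv_equiv track=rewrite | github.com/mjayhhh/PycharmProjects | pythonProject/Python 입시/COS PRO 2급/모의고사 1회.py | solution
-- ===== SOURCE A (Python) =====
-- def solution(scores):
--     grade_counter = [0 for i in range(5)]       # 0으로 된 리스트 5개 만들기
--     for x in scores:        # scores의 값을 차례로 x에 대입하면서 반복
--         if x >= 85:                     # 만약 점수가 85가 넘는다면
--             grade_counter[0] += 1
--         elif x >= 70:                   # 만약 점수가 70이 넘는다면
--             grade_counter[1] += 1
--         elif x >= 55:                   # 만약 점수가 55가 넘는다면
--             grade_counter[2] += 1
--         elif x >= 40:                   # 만약 점수가 40이 넘는다면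
--             grade_counter[3] += 1
--         else:                           # 모두다 아니라면
--             grade_counter[4] += 1
--     return grade_counter
--
-- scores = [86,72,98,60,45]       # 점수가 담겨있는 scores함수
-- ===== SOURCE B (Python) =====
-- def solution(scores):
--     # Count how many scores clear each threshold, then difference the
--     # cumulative counts: no per-element bucket assignment at all.
--     ge = [sum(1 for x in scores if x >= t) for t in (85, 70, 55, 40)]
--     n = len(scores)
--     return [ge[0], ge[1] - ge[0], ge[2] - ge[1], ge[3] - ge[2], n - ge[3]]
-- ===== Notes on version B (the rewrite author's own statement) =====
-- stated objective: alternative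
-- what changed: Instead of assigning each score to a bucket in one pass, B counts per threshold how many scores reach it (staged counting passes) and recovers the five buckets by differencing the cumulative counts.
import Mathlib
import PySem

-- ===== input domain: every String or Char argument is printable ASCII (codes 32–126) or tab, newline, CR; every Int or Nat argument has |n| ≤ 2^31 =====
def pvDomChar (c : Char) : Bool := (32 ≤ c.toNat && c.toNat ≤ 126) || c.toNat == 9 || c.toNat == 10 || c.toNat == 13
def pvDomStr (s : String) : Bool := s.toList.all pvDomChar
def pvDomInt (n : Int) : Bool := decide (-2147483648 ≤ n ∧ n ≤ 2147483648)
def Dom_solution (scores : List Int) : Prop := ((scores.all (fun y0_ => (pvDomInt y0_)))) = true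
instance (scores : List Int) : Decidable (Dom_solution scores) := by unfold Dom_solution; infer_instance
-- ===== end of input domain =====

-- B replaces A's one-pass per-element bucketing by staged per-threshold counting passes whose
-- cumulative counts are differenced into the five buckets; objective: alternative (same cost).

-- ===== PORT A =====
def pvStepA (gc : List Int) (x : Int) : List Int :=
  if x ≥ 85 then gc.set 0 (gc.getD 0 0 + 1)
  else if x ≥ 70 then gc.set 1 (gc.getD 1 0 + 1)
  else if x ≥ 55 then gc.set 2 (gc.getD 2 0 + 1)
  else if x ≥ 40 then gc.set 3 (gc.getD 3 0 + 1)
  else gc.set 4 (gc.getD 4 0 + 1)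

def solution (scores : List Int) : List Int :=
  scores.foldl pvStepA ((List.range 5).map (fun _ => (0 : Int)))

-- ===== PORT B =====
-- sum(1 for x in scores if x >= t) ported as countP, one pass per threshold
def solution_alt (scores : List Int) : List Int :=
  let ge : List Int := [85, 70, 55, 40].map (fun t => (scores.countP (fun x => decide (x ≥ t)) : Int))
  let n : Int := scores.length
  [ge.getD 0 0, ge.getD 1 0 - ge.getD 0 0, ge.getD 2 0 - ge.getD 1 0,
   ge.getD 3 0 - ge.getD 2 0, n - ge.getD 3 0]

-- ===== PRECONDITION & SPEC =====
def Spec_solution (scores : List Int) (out : List Int) : Prop := out = solution_alt scores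
instance (scores : List Int) (out : List Int) : Decidable (Spec_solution scores out) := by unfold Spec_solution; infer_instance

-- ===== CLAIM =====
def Claim_equal_solution : Prop := ∀ (scores : List Int), Dom_solution scores → Spec_solution scores (solution scores)

-- ===== LEMMAS AND PROOFS =====

theorem foldl_stepA (l : List Int) (a b c d e : Int) :
    l.foldl pvStepA [a, b, c, d, e] =
      [a + (l.countP (fun x => decide (x ≥ 85)) : Int),
       b + (l.countP (fun x => decide (x ≥ 70 ∧ ¬ x ≥ 85)) : Int),
       c + (l.countP (fun x => decide (x ≥ 55 ∧ ¬ x ≥ 70)) : Int),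
       d + (l.countP (fun x => decide (x ≥ 40 ∧ ¬ x ≥ 55)) : Int),
       e + (l.countP (fun x => decide (¬ x ≥ 40)) : Int)] := by
  induction l generalizing a b c d e with
  | nil => simp [List.countP]
  | cons x t ih =>
    simp only [List.foldl_cons, pvStepA, List.countP_cons]
    split_ifs <;>
      simp only [List.set, List.getD, List.getElem?_cons_zero, List.getElem?_cons_succ,
        Option.getD_some, ih, List.cons.injEq, and_true] <;>
      push_cast <;>
        (simp only [decide_eq_true_eq, not_le, ge_iff_le] at *; omega)

theorem countP_split (l : List Int) (s t : Int) (h : s ≤ t) :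
    (l.countP (fun x => decide (x ≥ s)) : Int) =
      (l.countP (fun x => decide (x ≥ t)) : Int) +
      (l.countP (fun x => decide (x ≥ s ∧ ¬ x ≥ t)) : Int) := by
  induction l with
  | nil => simp [List.countP]
  | cons x xs ih =>
    simp only [List.countP_cons]
    push_cast
    by_cases h1 : x ≥ s <;> by_cases h2 : x ≥ t <;> simp_all <;> omega

theorem countP_bot (l : List Int) :
    (l.length : Int) =
      (l.countP (fun x => decide (x ≥ 40)) : Int) +
      (l.countP (fun x => decide (¬ x ≥ 40)) : Int) := by
  induction l with
  | nil => simp [List.countP]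
  | cons x xs ih =>
    simp only [List.countP_cons, List.length_cons]
    push_cast
    by_cases h1 : x ≥ 40 <;> simp_all <;> omega

-- ===== VERDICT =====
theorem solution_spec : Claim_equal_solution := by
  intro scores _
  unfold Spec_solution solution solution_alt
  show scores.foldl pvStepA [0, 0, 0, 0, 0] = _
  rw [foldl_stepA]
  simp only [List.map, List.getD, List.getElem?_cons_zero, List.getElem?_cons_succ, Option.getD_some]
  have h1 := countP_split scores 70 85 (by norm_num)
  have h2 := countP_split scores 55 70 (by norm_num)
  have h3 := countP_split scores 40 55 (by norm_num)
  have h4 := countP_bot scores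
  simp only [List.cons.injEq, and_true]
  refine ⟨by omega, by omega, by omega, by omega, by omega⟩
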